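-- pv_equiv track=rewrite | github.com/miliar/Code_Jam_Webscraper | solutions_python/solutions_year13_round0_nr2/998.py | solve
-- ===== SOURCE A (Python) =====
-- from copy import deepcopy
--
-- def solve(case,values):
-- 	copyValues = deepcopy(values)
--
-- 	# ‰¡
-- 	for i in range(len(values)):
-- 		height = max(values[i])
-- 		for j in range(len(values[0])):
-- 			if values[i][j] >= height:
-- 				copyValues[i][j] = 0
--
-- 	# c
-- 	for j in range(len(values[0])):
-- 		tempList = []
-- 		for i in range(len(values)):
-- 			tempList.append(values[i][j])
-- 		height = max(tempList)
-- 		for i in range(len(values)):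
-- 			if values[i][j] >= height:
-- 				copyValues[i][j] = 0
--
-- 	bImpossible = False
-- 	for i in range(len(values)):
-- 		for j in range(len(values[0])):
-- 			if copyValues[i][j] > 0:
-- 				bImpossible = True
-- 				break
--
-- 	if bImpossible == True:
-- 		return "Case #%d: NO\n" % (case)
-- 	else:
-- 		return "Case #%d: YES\n" % (case)
-- ===== SOURCE B (Python) =====
-- def solve(case, values):
--     width = len(values[0])
--     def stuck(i, j):
--         v = values[i][j]
--         return (v > 0
--                 and any(x > v for x in values[i])
--                 and any(values[r][j] > v for r in range(len(values))))
--     verdict = "NO" if any(stuck(i, j)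
--                           for i in range(len(values))
--                           for j in range(width)) else "YES"
--     return "Case #%d: %s\n" % (case, verdict)
-- ===== Notes on version B (the rewrite author's own statement) =====
-- stated objective: alternative
-- what changed: B computes no maxima and keeps no mutated grid copy: a cell is stuck iff it is positive and some strictly taller cell exists in its row and in its column, checked by direct existential scans per cell, instead of A's zero-marking passes over a deep-copied grid followed by a residual scan.
import Mathlib
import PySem

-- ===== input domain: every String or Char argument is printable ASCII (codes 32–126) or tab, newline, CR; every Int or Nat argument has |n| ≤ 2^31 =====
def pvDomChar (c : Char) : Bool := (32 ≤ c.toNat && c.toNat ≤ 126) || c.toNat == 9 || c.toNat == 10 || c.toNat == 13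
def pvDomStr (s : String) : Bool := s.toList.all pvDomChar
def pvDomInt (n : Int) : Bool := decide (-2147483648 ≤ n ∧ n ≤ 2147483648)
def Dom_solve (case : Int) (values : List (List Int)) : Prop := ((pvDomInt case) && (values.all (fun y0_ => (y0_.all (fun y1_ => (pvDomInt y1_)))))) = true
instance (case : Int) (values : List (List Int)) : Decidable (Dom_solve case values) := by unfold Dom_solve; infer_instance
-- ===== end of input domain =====

-- B computes no maxima and keeps no grid copy: a cell is stuck iff it is positive and a strictly
-- taller cell exists in its row and in its column, decided by direct existential scans per cell;
-- A instead zero-marks a deep-copied grid in two passes and scans it for positive residuals.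

-- ===== PORT A =====
-- row pass: for j in range(len(values[0])): if values[i][j] >= height: copyValues[i][j] = 0  (row i)
def pvRowInner (values : List (List Int)) (i : Nat) (r : List Int) : List Int :=
  let height := (PySem.List.max? (values.getD i []) (fun y => y)).getD 0
  (List.range values.headI.length).foldl
    (fun r j => if (values.getD i []).getD j 0 ≥ height then r.set j 0 else r) r

-- for i in range(len(values)): mark row i of the copy
def pvRowPass (values c : List (List Int)) : List (List Int) :=
  (List.range values.length).foldl (fun c i => c.set i (pvRowInner values i (c.getD i []))) c

-- one column j: build tempList, take its max, zero the qualifying cells of column j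
def pvColInner (values : List (List Int)) (j : Nat) (c : List (List Int)) : List (List Int) :=
  let tempList := (List.range values.length).map (fun i => (values.getD i []).getD j 0)
  let height := (PySem.List.max? tempList (fun y => y)).getD 0
  (List.range values.length).foldl
    (fun c i => if (values.getD i []).getD j 0 ≥ height then c.set i ((c.getD i []).set j 0) else c) c

def pvColPass (values c : List (List Int)) : List (List Int) :=
  (List.range values.headI.length).foldl (fun c j => pvColInner values j c) c

def solve (case : Int) (values : List (List Int)) : String :=
  let copy2 := pvColPass values (pvRowPass values values)
  let bImpossible := (List.range values.length).foldl
    (fun b i => (List.range values.headI.length).foldl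
      (fun b j => if (copy2.getD i []).getD j 0 > 0 then true else b) b) false
  if bImpossible then "Case #" ++ PySem.Int.toStr case ++ ": NO\n"
  else "Case #" ++ PySem.Int.toStr case ++ ": YES\n"

-- ===== PORT B =====
def solve_alt (case : Int) (values : List (List Int)) : String :=
  let width := values.headI.length
  let stuck := fun (i j : Nat) =>
    let v := (values.getD i []).getD j 0
    decide (v > 0) && (values.getD i []).any (fun x => decide (x > v))
      && (List.range values.length).any (fun r => decide ((values.getD r []).getD j 0 > v))
  let verdict := if (List.range values.length).any (fun i => (List.range width).any (fun j => stuck i j))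
    then "NO" else "YES"
  "Case #" ++ PySem.Int.toStr case ++ ": " ++ verdict ++ "\n"

-- ===== PRECONDITION & SPEC =====
-- Pre_ excludes exactly the inputs where the Python A raises: values == [] (IndexError on
-- values[0]), an empty row (ValueError on max), or a row shorter than row 0 (IndexError).
def Pre_solve (case : Int) (values : List (List Int)) : Prop :=
  values ≠ [] ∧ ∀ row ∈ values, row ≠ [] ∧ values.headI.length ≤ row.length
instance (case : Int) (values : List (List Int)) : Decidable (Pre_solve case values) := by
  unfold Pre_solve; infer_instance

def pvWitness_solve : Int × List (List Int) := (1, [[2, 1], [1, 2]])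

def Spec_solve (case : Int) (values : List (List Int)) (out : String) : Prop := out = solve_alt case values
instance (case : Int) (values : List (List Int)) (out : String) : Decidable (Spec_solve case values out) := by unfold Spec_solve; infer_instance

-- ===== CLAIM (what is proved, stated in full; the proofs are below) =====
def Claim_equal_solve : Prop := ∀ (case : Int) (values : List (List Int)), Dom_solve case values → Pre_solve case values → Spec_solve case values (solve case values)

-- ===== LEMMAS AND PROOFS =====

lemma pv_foldl_set_getD (p : Nat → Prop) [DecidablePred p] (m : Nat) :
    ∀ (r : List Int) (j : Nat),
      ((List.range m).foldl (fun r j => if p j then r.set j 0 else r) r).getD j 0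
        = if j < m ∧ p j then 0 else r.getD j 0 := by
  induction m with
  | zero => intro r j; simp
  | succ m ih =>
    intro r j
    rw [List.range_succ, List.foldl_append]
    simp only [List.foldl_cons, List.foldl_nil]
    by_cases hp : p m
    · simp only [hp, if_true]
      rcases eq_or_ne j m with rfl | hne
      · rw [List.getD_eq_getElem?_getD, List.getElem?_set, if_pos rfl,
           if_pos (⟨Nat.lt_succ_self _, hp⟩ : _ < _ + 1 ∧ p _)]
        split <;> rfl
      · have hset : (((List.range m).foldl (fun r j => if p j then r.set j 0 else r) r).set m 0).getD j 0
            = ((List.range m).foldl (fun r j => if p j then r.set j 0 else r) r).getD j 0 := by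
          simp [List.getD_eq_getElem?_getD, hne.symm]
        rw [hset, ih]
        have hiff : (j < m + 1 ∧ p j) ↔ (j < m ∧ p j) :=
          ⟨fun ⟨h, hpj⟩ => ⟨by omega, hpj⟩, fun ⟨h, hpj⟩ => ⟨by omega, hpj⟩⟩
        simp only [hiff]
    · simp only [hp, if_false]
      rw [ih]
      have hiff : (j < m + 1 ∧ p j) ↔ (j < m ∧ p j) := by
        constructor
        · rintro ⟨h, hpj⟩
          rcases eq_or_ne j m with rfl | hne
          · exact absurd hpj hp
          · exact ⟨by omega, hpj⟩
        · rintro ⟨h, hpj⟩; exact ⟨by omega, hpj⟩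
      simp only [hiff]

lemma pv_foldl_set_nil (p : Nat → Prop) [DecidablePred p] (l : List Nat) :
    l.foldl (fun r j => if p j then r.set j 0 else r) ([] : List Int) = [] := by
  induction l with
  | nil => rfl
  | cons a t ih => simp only [List.foldl_cons, List.set_nil]; split <;> exact ih

lemma pv_setfold_length (g : Nat → List Int → List Int) (l : List Nat) :
    ∀ (c : List (List Int)), (l.foldl (fun c i => c.set i (g i (c.getD i []))) c).length = c.length := by
  induction l with
  | nil => intro c; rfl
  | cons a t ih => intro c; rw [List.foldl_cons, ih, List.length_set]

lemma pv_rowfold_getD (g : Nat → List Int → List Int) (hg : ∀ i, g i [] = []) (m : Nat) :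
    ∀ (c : List (List Int)) (i : Nat),
      ((List.range m).foldl (fun c i => c.set i (g i (c.getD i []))) c).getD i []
        = if i < m then g i (c.getD i []) else c.getD i [] := by
  induction m with
  | zero => intro c i; simp
  | succ m ih =>
    intro c i
    rw [List.range_succ, List.foldl_append]
    simp only [List.foldl_cons, List.foldl_nil]
    have hFm : ((List.range m).foldl (fun c i => c.set i (g i (c.getD i []))) c).getD m []
        = c.getD m [] := by rw [ih]; simp
    have hlen : ((List.range m).foldl (fun c i => c.set i (g i (c.getD i []))) c).length
        = c.length := pv_setfold_length g _ c
    rcases eq_or_ne i m with rfl | hne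
    · rw [List.getD_eq_getElem?_getD, List.getElem?_set, if_pos rfl, hFm, if_pos (Nat.lt_succ_self i)]
      split_ifs with h
      · rfl
      · rw [hlen] at h
        have hc : c.getD i [] = [] := List.getD_eq_default _ _ (by omega)
        rw [hc, hg]; rfl
    · rw [List.getD_eq_getElem?_getD, List.getElem?_set, if_neg (by omega : ¬ m = i),
         ← List.getD_eq_getElem?_getD, ih]
      have hiff : (i < m + 1) ↔ (i < m) := by omega
      simp only [hiff]

lemma pv_getD_set_self (L : List (List Int)) (i : Nat) (x : List Int) :
    (L.set i x).getD i [] = if i < L.length then x else L.getD i [] := by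
  rw [List.getD_eq_getElem?_getD, List.getElem?_set, if_pos rfl]
  split_ifs with h
  · rfl
  · rw [List.getD_eq_getElem?_getD, List.getElem?_eq_none (by omega)]

lemma pv_getD_set_ne (L : List (List Int)) (i i' : Nat) (x : List Int) (h : i ≠ i') :
    (L.set i x).getD i' [] = L.getD i' [] := by
  rw [List.getD_eq_getElem?_getD, List.getElem?_set, if_neg h, ← List.getD_eq_getElem?_getD]

lemma pv_colfold_length (q : Nat → Prop) [DecidablePred q] (j : Nat) (l : List Nat) :
    ∀ (c : List (List Int)),
      (l.foldl (fun c i => if q i then c.set i ((c.getD i []).set j 0) else c) c).length = c.length := by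
  induction l with
  | nil => intro c; rfl
  | cons a t ih =>
    intro c
    rw [List.foldl_cons]
    split
    · rw [ih, List.length_set]
    · rw [ih]

lemma pv_set_getD_self (X : List Int) (j : Nat) : (X.set j 0).getD j 0 = 0 := by
  rw [List.getD_eq_getElem?_getD, List.getElem?_set, if_pos rfl]
  split <;> rfl

lemma pv_colfold_getD (q : Nat → Prop) [DecidablePred q] (j : Nat) (m : Nat) :
    ∀ (c : List (List Int)) (i j' : Nat),
      (((List.range m).foldl (fun c i => if q i then c.set i ((c.getD i []).set j 0) else c) c).getD i []).getD j' 0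
        = if i < m ∧ j' = j ∧ q i then 0 else (c.getD i []).getD j' 0 := by
  induction m with
  | zero => intro c i j'; simp
  | succ m ih =>
    intro c i j'
    rw [List.range_succ, List.foldl_append]
    simp only [List.foldl_cons, List.foldl_nil]
    set F := (List.range m).foldl (fun c i => if q i then c.set i ((c.getD i []).set j 0) else c) c with hF
    by_cases hq : q m
    · rw [if_pos hq]
      have hlen : F.length = c.length := pv_colfold_length q j _ c
      rcases eq_or_ne i m with rfl | hne
      · rw [pv_getD_set_self]
        by_cases h : i < F.length
        · rw [if_pos h]
          rcases eq_or_ne j' j with rfl | hj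
          · rw [pv_set_getD_self, if_pos ⟨Nat.lt_succ_self i, rfl, hq⟩]
          · have hstep : ((F.getD i []).set j 0).getD j' 0 = (F.getD i []).getD j' 0 := by
              rw [List.getD_eq_getElem?_getD, List.getElem?_set, if_neg (Ne.symm hj),
                 ← List.getD_eq_getElem?_getD]
            rw [hstep, hF, ih]
            simp [hj]
        · rw [if_neg h, hF, ih]
          simp only [Nat.lt_irrefl, false_and, if_false]
          rw [hlen] at h
          have hc : c.getD i [] = [] := List.getD_eq_default _ _ (by omega)
          rw [hc]
          split_ifs <;> rfl
      · rw [pv_getD_set_ne _ _ _ _ (Ne.symm hne), hF, ih]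
        have hiff : (i < m + 1 ∧ j' = j ∧ q i) ↔ (i < m ∧ j' = j ∧ q i) := by
          constructor
          · rintro ⟨h1, h2, h3⟩; exact ⟨by omega, h2, h3⟩
          · rintro ⟨h1, h2, h3⟩; exact ⟨by omega, h2, h3⟩
        simp only [hiff]
    · rw [if_neg hq, hF, ih]
      have hiff : (i < m + 1 ∧ j' = j ∧ q i) ↔ (i < m ∧ j' = j ∧ q i) := by
        constructor
        · rintro ⟨h1, h2, h3⟩
          rcases eq_or_ne i m with rfl | hne
          · exact absurd h3 hq
          · exact ⟨by omega, h2, h3⟩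
        · rintro ⟨h1, h2, h3⟩; exact ⟨by omega, h2, h3⟩
      simp only [hiff]

lemma pv_foldl_ite_or (p : Nat → Prop) [DecidablePred p] :
    ∀ (l : List Nat) (b : Bool),
      l.foldl (fun b x => if p x then true else b) b = (b || l.any fun x => decide (p x)) := by
  intro l
  induction l with
  | nil => intro b; simp
  | cons a t ih =>
    intro b
    rw [List.foldl_cons, ih, List.any_cons]
    by_cases h : p a <;> simp [h]

lemma pv_foldl_or (g : Nat → Bool) :
    ∀ (l : List Nat) (b : Bool), l.foldl (fun b i => b || g i) b = (b || l.any g) := by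
  intro l
  induction l with
  | nil => intro b; simp
  | cons a t ih => intro b; rw [List.foldl_cons, ih, List.any_cons, Bool.or_assoc]

def pvRmax (values : List (List Int)) (i : Nat) : Int :=
  (PySem.List.max? (values.getD i []) (fun y => y)).getD 0
def pvCmax (values : List (List Int)) (j : Nat) : Int :=
  (PySem.List.max? ((List.range values.length).map (fun i => (values.getD i []).getD j 0)) (fun y => y)).getD 0

lemma pv_rowInner_getD (values : List (List Int)) (i : Nat) (r : List Int) (j : Nat) :
    (pvRowInner values i r).getD j 0
      = if j < values.headI.length ∧ (values.getD i []).getD j 0 ≥ pvRmax values i then 0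
        else r.getD j 0 := by
  simp only [pvRowInner]
  exact pv_foldl_set_getD (fun j => (values.getD i []).getD j 0 ≥ pvRmax values i) _ r j

lemma pv_rowInner_nil (values : List (List Int)) (i : Nat) : pvRowInner values i [] = [] := by
  simp only [pvRowInner]
  exact pv_foldl_set_nil _ _

lemma pv_rowPass_getD (values c : List (List Int)) (i : Nat) :
    (pvRowPass values c).getD i []
      = if i < values.length then pvRowInner values i (c.getD i []) else c.getD i [] := by
  exact pv_rowfold_getD (fun i r => pvRowInner values i r) (fun i => pv_rowInner_nil values i) _ c i

lemma pv_colInner_getD (values : List (List Int)) (j : Nat) (c : List (List Int)) (i j' : Nat) :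
    ((pvColInner values j c).getD i []).getD j' 0
      = if i < values.length ∧ j' = j ∧ (values.getD i []).getD j 0 ≥ pvCmax values j then 0
        else (c.getD i []).getD j' 0 := by
  simp only [pvColInner]
  exact pv_colfold_getD (fun i => (values.getD i []).getD j 0 ≥ pvCmax values j) j _ c i j'

lemma pv_colPass_aux (values : List (List Int)) (m : Nat) :
    ∀ (c : List (List Int)) (i j' : Nat),
      (((List.range m).foldl (fun c j => pvColInner values j c) c).getD i []).getD j' 0
        = if i < values.length ∧ j' < m ∧ (values.getD i []).getD j' 0 ≥ pvCmax values j' then 0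
          else (c.getD i []).getD j' 0 := by
  induction m with
  | zero => intro c i j'; simp
  | succ m ih =>
    intro c i j'
    rw [List.range_succ, List.foldl_append]
    simp only [List.foldl_cons, List.foldl_nil]
    rw [pv_colInner_getD]
    rcases eq_or_ne j' m with rfl | hne
    · by_cases hq : (values.getD i []).getD j' 0 ≥ pvCmax values j'
      · by_cases hi : i < values.length
        · rw [if_pos ⟨hi, rfl, hq⟩, if_pos ⟨hi, Nat.lt_succ_self j', hq⟩]
        · rw [if_neg (by tauto), ih, if_neg (by tauto), if_neg (by tauto)]
      · rw [if_neg (by tauto), ih, if_neg (by tauto), if_neg (by tauto)]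
    · rw [if_neg (by tauto), ih]
      have hiff : (i < values.length ∧ j' < m + 1 ∧ (values.getD i []).getD j' 0 ≥ pvCmax values j')
          ↔ (i < values.length ∧ j' < m ∧ (values.getD i []).getD j' 0 ≥ pvCmax values j') := by
        constructor
        · rintro ⟨h1, h2, h3⟩; exact ⟨h1, by omega, h3⟩
        · rintro ⟨h1, h2, h3⟩; exact ⟨h1, by omega, h3⟩
      simp only [hiff]

lemma pv_copy2_cell (values : List (List Int)) (i j : Nat)
    (hi : i < values.length) (hj : j < values.headI.length) :
    ((pvColPass values (pvRowPass values values)).getD i []).getD j 0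
      = if (values.getD i []).getD j 0 ≥ pvCmax values j then 0
        else if (values.getD i []).getD j 0 ≥ pvRmax values i then 0
        else (values.getD i []).getD j 0 := by
  simp only [pvColPass]
  rw [pv_colPass_aux, pv_rowPass_getD, if_pos hi, pv_rowInner_getD]
  by_cases hq : (values.getD i []).getD j 0 ≥ pvCmax values j
  · rw [if_pos ⟨hi, hj, hq⟩, if_pos hq]
  · rw [if_neg (by tauto), if_neg hq]
    by_cases hr : (values.getD i []).getD j 0 ≥ pvRmax values i
    · rw [if_pos ⟨hj, hr⟩, if_pos hr]
    · rw [if_neg (by tauto), if_neg hr]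

-- existential scan ↔ strict comparison against the running max
lemma pv_any_gt_eq (l : List Int) (hl : l ≠ []) (v : Int) :
    l.any (fun x => decide (x > v)) = decide (v < (PySem.List.max? l (fun y => y)).getD 0) := by
  obtain ⟨m, hm⟩ : ∃ m, PySem.List.max? l (fun y => y) = some m := by
    cases h : PySem.List.max? l (fun y => y) with
    | none => exact absurd ((PySem.List.max?_eq_none_iff l (fun y => y)).mp h) hl
    | some m => exact ⟨m, rfl⟩
  have hmem : m ∈ l := PySem.List.max?_mem hm
  have hmax : ∀ y ∈ l, y ≤ m := PySem.List.max?_isMax hm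
  rw [hm, Option.getD_some]
  rcases lt_or_ge v m with h | h
  · rw [decide_eq_true h]
    exact List.any_eq_true.mpr ⟨m, hmem, decide_eq_true h⟩
  · rw [decide_eq_false (not_lt.mpr h)]
    refine List.any_eq_false.mpr ?_
    intro x hx
    simp only [decide_eq_true_eq, not_lt]
    exact le_trans (hmax x hx) h

lemma pv_getD_mem (L : List (List Int)) (i : Nat) (h : i < L.length) : L.getD i [] ∈ L := by
  rw [List.getD_eq_getElem?_getD, List.getElem?_eq_getElem h, Option.getD_some]
  exact L.getElem_mem h

lemma pv_cell_eq (values : List (List Int))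
    (_hne : values ≠ [])
    (hrows : ∀ row ∈ values, row ≠ [] ∧ values.headI.length ≤ row.length)
    (i j : Nat) (hi : i < values.length) (hj : j < values.headI.length) :
    decide (((pvColPass values (pvRowPass values values)).getD i []).getD j 0 > 0)
      = (decide ((values.getD i []).getD j 0 > 0)
          && (values.getD i []).any (fun x => decide (x > (values.getD i []).getD j 0))
          && (List.range values.length).any
              (fun r => decide ((values.getD r []).getD j 0 > (values.getD i []).getD j 0))) := by
  have hrow : values.getD i [] ≠ [] := (hrows _ (pv_getD_mem values i hi)).1
  have hcolne : (List.range values.length).map (fun r => (values.getD r []).getD j 0) ≠ [] := by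
    simp only [ne_eq, List.map_eq_nil_iff, List.range_eq_nil]
    omega
  have hcol : (List.range values.length).any
        (fun r => decide ((values.getD r []).getD j 0 > (values.getD i []).getD j 0))
      = decide ((values.getD i []).getD j 0 < pvCmax values j) := by
    have h := pv_any_gt_eq ((List.range values.length).map fun r => (values.getD r []).getD j 0)
      hcolne ((values.getD i []).getD j 0)
    rw [List.any_map] at h
    exact h
  rw [hcol, pv_any_gt_eq _ hrow, pv_copy2_cell values i j hi hj]
  show _ = (_ && decide (_ < pvRmax values i) && _)
  split_ifs with h1 h2
  · rw [decide_eq_false (by omega : ¬ (0:Int) > 0),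
       decide_eq_false (by omega : ¬ (values.getD i []).getD j 0 < pvCmax values j)]
    simp
  · rw [decide_eq_false (by omega : ¬ (0:Int) > 0),
       decide_eq_false (by omega : ¬ (values.getD i []).getD j 0 < pvRmax values i)]
    simp
  · rw [decide_eq_true (by omega : (values.getD i []).getD j 0 < pvRmax values i),
       decide_eq_true (by omega : (values.getD i []).getD j 0 < pvCmax values j)]
    simp

lemma pv_main_eq (case : Int) (values : List (List Int)) (hpre : Pre_solve case values) :
    solve case values = solve_alt case values := by
  obtain ⟨hne, hrows⟩ := hpre
  simp only [solve, solve_alt]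
  have hA : (List.range values.length).foldl
      (fun b i => (List.range values.headI.length).foldl
        (fun b j => if ((pvColPass values (pvRowPass values values)).getD i []).getD j 0 > 0 then true else b) b) false
      = (List.range values.length).any (fun i => (List.range values.headI.length).any
          (fun j => decide (((pvColPass values (pvRowPass values values)).getD i []).getD j 0 > 0))) := by
    have h1 : (fun (b : Bool) (i : Nat) => (List.range values.headI.length).foldl
        (fun b j => if ((pvColPass values (pvRowPass values values)).getD i []).getD j 0 > 0 then true else b) b)
        = (fun (b : Bool) (i : Nat) => (b || (List.range values.headI.length).any
            (fun j => decide (((pvColPass values (pvRowPass values values)).getD i []).getD j 0 > 0)))) :=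
      funext fun b => funext fun i => pv_foldl_ite_or _ _ b
    rw [h1, pv_foldl_or]
    simp
  rw [hA]
  have hBools : (List.range values.length).any (fun i => (List.range values.headI.length).any
        (fun j => decide (((pvColPass values (pvRowPass values values)).getD i []).getD j 0 > 0)))
      = (List.range values.length).any (fun i => (List.range values.headI.length).any (fun j =>
          decide ((values.getD i []).getD j 0 > 0)
            && (values.getD i []).any (fun x => decide (x > (values.getD i []).getD j 0))
            && (List.range values.length).any
                (fun r => decide ((values.getD r []).getD j 0 > (values.getD i []).getD j 0)))) := by
    apply PySem.List.any_congr_mem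
    intro i hi
    rw [List.mem_range] at hi
    apply PySem.List.any_congr_mem
    intro j hj
    rw [List.mem_range] at hj
    exact pv_cell_eq values hne hrows i j hi hj
  rw [hBools]
  cases (List.range values.length).any (fun i => (List.range values.headI.length).any (fun j =>
      decide ((values.getD i []).getD j 0 > 0)
        && (values.getD i []).any (fun x => decide (x > (values.getD i []).getD j 0))
        && (List.range values.length).any
            (fun r => decide ((values.getD r []).getD j 0 > (values.getD i []).getD j 0)))) <;>
    simp [String.append_assoc]

-- ===== VERDICT (by name: the statement is the Claim_ definition above) =====
theorem solve_spec : Claim_equal_solve := by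
  intro case values _dom hpre
  unfold Spec_solve
  exact pv_main_eq case values hpre
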